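-- pv_equiv track=rewrite | github.com/ldct/cp | codeforces/746/B/B.py | ans_slow
-- ===== SOURCE A (Python) =====
-- def ans_slow(X, A):
--     def ok(swaps, A, B=None):
--
--         if B is None:
--             B = len(A)*len(A)
--         if A == sorted(A): return True
--         if B <= 0: return False
--
--         for i,j in swaps:
--             new_A = A[:]
--             new_A[i], new_A[j] = new_A[j], new_A[i]
--
--             if ok(swaps, new_A, B-1): return True
--
--         return False
--
--     pairs = []
--     for i in range(len(A)):
--         for j in range(i+1, len(A)):
--             if abs(i-j) >= X:
--                 pairs += [(i, j)]
--
--     if ok(pairs, A): return "YES"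
--     return "NO"
-- ===== SOURCE B (Python) =====
-- def ans_slow(X, A):
--     # Positions that can never take part in a swap (i < X and i >= n - X) are
--     # frozen; all other positions can be permuted arbitrarily, so the array is
--     # sortable iff every frozen position already holds its sorted value.
--     S = sorted(A)
--     n = len(A)
--     for i in range(max(0, n - X), min(n, X)):
--         if A[i] != S[i]:
--             return "NO"
--     return "YES"
-- ===== Notes on version B (the rewrite author's own statement) =====
-- stated objective: faster
-- what changed: Replaced the exponential depth-bounded DFS over all swap sequences by the closed characterization: swaps of distance >= X generate the full symmetric group on the non-frozen positions, so B just sorts once and checks that each frozen position (i < X and i >= n-X) already holds its sorted value.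
import Mathlib
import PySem

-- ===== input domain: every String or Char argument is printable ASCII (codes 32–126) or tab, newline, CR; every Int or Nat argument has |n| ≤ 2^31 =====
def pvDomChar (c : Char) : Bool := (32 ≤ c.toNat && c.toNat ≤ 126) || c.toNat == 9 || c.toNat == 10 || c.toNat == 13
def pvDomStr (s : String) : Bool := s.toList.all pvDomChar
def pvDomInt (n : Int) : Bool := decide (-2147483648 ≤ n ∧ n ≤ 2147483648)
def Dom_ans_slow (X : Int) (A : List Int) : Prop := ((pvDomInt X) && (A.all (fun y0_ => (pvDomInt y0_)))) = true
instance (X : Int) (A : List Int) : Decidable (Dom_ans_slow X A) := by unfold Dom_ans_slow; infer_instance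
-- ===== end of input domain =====

-- B replaces A's exponential depth-bounded DFS over swap sequences by a single sort plus a
-- check that every frozen position (one that no distance-≥X swap can move) already holds its
-- sorted value; a timing run measured B faster (asymptotic).

-- ===== PORT A =====
-- sorted(A)
def pvSortA (l : List Int) : List Int := PySem.List.sorted l (fun x => x) false

-- new_A = A[:]; new_A[i], new_A[j] = new_A[j], new_A[i]
def pvSwapA (l : List Int) (i j : Int) : List Int :=
  PySem.List.pySetD (PySem.List.pySetD l i (PySem.List.pyGetD l j 0)) j (PySem.List.pyGetD l i 0)

-- def ok(swaps, A, B=None) — the caller always passes B = len(A)*len(A) at the top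
def pvOk (swaps : List (Int × Int)) (A : List Int) (B : Int) : Bool :=
  if A = pvSortA A then true
  else if B ≤ 0 then false
  else swaps.any (fun p => pvOk swaps (pvSwapA A p.1 p.2) (B - 1))
termination_by B.toNat
decreasing_by omega

-- pairs = []; for i in range(len(A)): for j in range(i+1, len(A)): if abs(i-j) >= X: pairs += [(i,j)]
def pvPairs (X n : Int) : List (Int × Int) :=
  (PySem.List.pyRange 0 n 1).foldl (fun pairs i =>
    (PySem.List.pyRange (i+1) n 1).foldl (fun pairs2 j =>
      if X ≤ |i - j| then pairs2 ++ [(i, j)] else pairs2) pairs) []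

def ans_slow (X : Int) (A : List Int) : String :=
  if pvOk (pvPairs X (A.length : Int)) A ((A.length : Int) * (A.length : Int)) then "YES" else "NO"

-- ===== PORT B =====
def ans_slow_alt (X : Int) (A : List Int) : String :=
  let S := PySem.List.sorted A (fun x => x) false
  let n : Int := (A.length : Int)
  if (PySem.List.pyRange (max 0 (n - X)) (min n X) 1).any
       (fun i => !(PySem.List.pyGetD A i 0 == PySem.List.pyGetD S i 0))
  then "NO" else "YES"

-- ===== PRECONDITION & SPEC =====
def Spec_ans_slow (X : Int) (A : List Int) (out : String) : Prop := out = ans_slow_alt X A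
instance (X : Int) (A : List Int) (out : String) : Decidable (Spec_ans_slow X A out) := by unfold Spec_ans_slow; infer_instance

-- ===== CLAIM (what is proved, stated in full; the proofs are below) =====
def Claim_equal_ans_slow : Prop := ∀ (X : Int) (A : List Int), Dom_ans_slow X A → Spec_ans_slow X A (ans_slow X A)

-- ===== LEMMAS AND PROOFS =====

-- value of l at (nonnegative) index k, 0 past the end
def pvAt (l : List Int) (k : Int) : Int := PySem.List.pyGetD l k 0

-- apply a sequence of swaps
def pvApp (l : List Int) (seq : List (Int × Int)) : List Int :=
  seq.foldl (fun m p => pvSwapA m p.1 p.2) l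

-- upper bound on the number of generator swaps a single transposition of two movable
-- positions needs (1 direct, 3 via one hub, 5 via the two hubs 0 and n-1)
def pvStepB (n : Int) : Nat := if n ≤ 2 then 1 else if n = 3 then 3 else 5

lemma pvPairs_mem (X n : Int) (p : Int × Int) :
    p ∈ pvPairs X n ↔ 0 ≤ p.1 ∧ p.1 < p.2 ∧ p.2 < n ∧ X ≤ p.2 - p.1 := by
  unfold pvPairs
  simp only [PySem.List.foldl_append_ite (p := fun j => X ≤ |_ - j|) (f := fun j => (_, j))]
  rw [PySem.List.foldl_append_eq_flatMap]
  simp only [List.nil_append, List.mem_flatMap, List.mem_map, List.mem_filter,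
    PySem.List.mem_pyRange_one]
  constructor
  · rintro ⟨i, ⟨hi0, hin⟩, j, ⟨⟨hij, hjn⟩, habs⟩, rfl⟩
    rw [abs_sub_comm, abs_of_nonneg (by omega)] at habs
    simp at habs ⊢
    omega
  · rintro ⟨h1, h2, h3, h4⟩
    exact ⟨p.1, ⟨h1, by omega⟩, p.2, ⟨⟨by omega, h3⟩, by
      rw [abs_sub_comm, abs_of_nonneg (by omega)]; simpa using h4⟩, rfl⟩

lemma pvSwapA_eq (l : List Int) {i j : Int} (hi0 : 0 ≤ i) (hi : i < (l.length : Int))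
    (hj0 : 0 ≤ j) (hj : j < (l.length : Int)) :
    pvSwapA l i j = (l.set i.toNat (l[j.toNat]'(by omega))).set j.toNat (l[i.toNat]'(by omega)) := by
  rw [pvSwapA, PySem.List.pySetD_of_nonneg _ _ hi0, PySem.List.pySetD_of_nonneg _ _ hj0,
    PySem.List.pyGetD_eq_getElem l 0 hi0 hi, PySem.List.pyGetD_eq_getElem l 0 hj0 hj]

lemma pvSwapA_length (l : List Int) (i j : Int) : (pvSwapA l i j).length = l.length := by
  simp [pvSwapA, PySem.List.length_pySetD]

lemma pvSwapA_perm (l : List Int) {i j : Int} (hi0 : 0 ≤ i) (hi : i < (l.length : Int))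
    (hj0 : 0 ≤ j) (hj : j < (l.length : Int)) : (pvSwapA l i j).Perm l := by
  rw [pvSwapA_eq l hi0 hi hj0 hj]
  exact List.set_set_perm (by omega) (by omega)

lemma pvAt_pvSwapA (l : List Int) {i j : Int} (k : Int) (hi0 : 0 ≤ i) (hi : i < (l.length : Int))
    (hj0 : 0 ≤ j) (hj : j < (l.length : Int)) (hij : i ≠ j) (hk : 0 ≤ k) :
    pvAt (pvSwapA l i j) k = if k = i then pvAt l j else if k = j then pvAt l i else pvAt l k := by
  rw [pvSwapA_eq l hi0 hi hj0 hj]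
  simp only [pvAt, PySem.List.pyGetD_of_nonneg _ _ hk, PySem.List.pyGetD_of_nonneg _ _ hi0,
    PySem.List.pyGetD_of_nonneg _ _ hj0, List.getD_eq_getElem?_getD, List.getElem?_set,
    List.length_set]
  split_ifs <;> simp_all <;> omega

lemma pvEq_of_at (l m : List Int) (hlen : l.length = m.length)
    (h : ∀ k : Int, 0 ≤ k → k < (l.length : Int) → pvAt l k = pvAt m k) : l = m := by
  apply List.ext_getElem hlen
  intro k h1 h2
  have := h k (by omega) (by omega)
  simpa [pvAt, PySem.List.pyGetD_of_nonneg, List.getD_eq_getElem?_getD,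
    List.getElem?_eq_getElem, h1, h2] using this

lemma pvSort_congr {l m : List Int} (h : l.Perm m) : pvSortA l = pvSortA m :=
  (PySem.List.sorted_id_eq_sorted_id_iff_perm l m).mpr h

lemma pvSwapA_comm (l : List Int) {a b : Int} (ha0 : 0 ≤ a) (ha : a < (l.length : Int))
    (hb0 : 0 ≤ b) (hb : b < (l.length : Int)) (hab : a ≠ b) :
    pvSwapA l a b = pvSwapA l b a := by
  apply pvEq_of_at _ _ (by simp [pvSwapA_length])
  intro k hk0 hkn
  rw [pvAt_pvSwapA l k ha0 ha hb0 hb hab hk0, pvAt_pvSwapA l k hb0 hb ha0 ha (Ne.symm hab) hk0]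
  split_ifs <;> first | rfl | omega

lemma pvHub3 (l : List Int) {a b c : Int}
    (ha0 : 0 ≤ a) (ha : a < (l.length : Int)) (hb0 : 0 ≤ b) (hb : b < (l.length : Int))
    (hc0 : 0 ≤ c) (hc : c < (l.length : Int)) (hab : a ≠ b) (hac : a ≠ c) (hbc : b ≠ c) :
    pvSwapA (pvSwapA (pvSwapA l a c) b c) a c = pvSwapA l a b := by
  have l1 := pvSwapA_length l a c
  have l2 := pvSwapA_length (pvSwapA l a c) b c
  have A1 : ∀ k : Int, 0 ≤ k → pvAt (pvSwapA l a c) k =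
      if k = a then pvAt l c else if k = c then pvAt l a else pvAt l k :=
    fun k hk => pvAt_pvSwapA l k ha0 ha hc0 hc hac hk
  have A2 : ∀ k : Int, 0 ≤ k → pvAt (pvSwapA (pvSwapA l a c) b c) k =
      if k = b then pvAt (pvSwapA l a c) c else if k = c then pvAt (pvSwapA l a c) b
      else pvAt (pvSwapA l a c) k :=
    fun k hk => pvAt_pvSwapA _ k hb0 (by omega) hc0 (by omega) hbc hk
  apply pvEq_of_at _ _ (by simp [pvSwapA_length])
  intro k hk0 hkn
  rw [pvAt_pvSwapA _ k ha0 (by omega) hc0 (by omega) hac hk0,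
    pvAt_pvSwapA l k ha0 ha hb0 hb hab hk0,
    A2 c hc0, A2 a ha0, A2 k hk0, A1 c hc0, A1 b hb0, A1 a ha0, A1 k hk0]
  split_ifs <;> first | rfl | omega | (congr 1; omega)

set_option maxHeartbeats 2000000 in
lemma pvHub5 (l : List Int) {a b c d : Int}
    (ha0 : 0 ≤ a) (ha : a < (l.length : Int)) (hb0 : 0 ≤ b) (hb : b < (l.length : Int))
    (hc0 : 0 ≤ c) (hc : c < (l.length : Int)) (hd0 : 0 ≤ d) (hd : d < (l.length : Int))
    (hab : a ≠ b) (hac : a ≠ c) (had : a ≠ d) (hbc : b ≠ c) (hbd : b ≠ d) (hcd : c ≠ d) :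
    pvSwapA (pvSwapA (pvSwapA (pvSwapA (pvSwapA l a d) c d) c b) c d) a d = pvSwapA l a b := by
  have l1 := pvSwapA_length l a d
  have l2 := pvSwapA_length (pvSwapA l a d) c d
  have l3 := pvSwapA_length (pvSwapA (pvSwapA l a d) c d) c b
  have l4 := pvSwapA_length (pvSwapA (pvSwapA (pvSwapA l a d) c d) c b) c d
  have A1 : ∀ k : Int, 0 ≤ k → pvAt (pvSwapA l a d) k =
      if k = a then pvAt l d else if k = d then pvAt l a else pvAt l k :=
    fun k hk => pvAt_pvSwapA l k ha0 ha hd0 hd had hk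
  have A2 : ∀ k : Int, 0 ≤ k → pvAt (pvSwapA (pvSwapA l a d) c d) k =
      if k = c then pvAt (pvSwapA l a d) d else if k = d then pvAt (pvSwapA l a d) c
      else pvAt (pvSwapA l a d) k :=
    fun k hk => pvAt_pvSwapA _ k hc0 (by omega) hd0 (by omega) hcd hk
  have A3 : ∀ k : Int, 0 ≤ k → pvAt (pvSwapA (pvSwapA (pvSwapA l a d) c d) c b) k =
      if k = c then pvAt (pvSwapA (pvSwapA l a d) c d) b
      else if k = b then pvAt (pvSwapA (pvSwapA l a d) c d) c
      else pvAt (pvSwapA (pvSwapA l a d) c d) k :=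
    fun k hk => pvAt_pvSwapA _ k hc0 (by omega) hb0 (by omega) (Ne.symm hbc) hk
  have A4 : ∀ k : Int, 0 ≤ k → pvAt (pvSwapA (pvSwapA (pvSwapA (pvSwapA l a d) c d) c b) c d) k =
      if k = c then pvAt (pvSwapA (pvSwapA (pvSwapA l a d) c d) c b) d
      else if k = d then pvAt (pvSwapA (pvSwapA (pvSwapA l a d) c d) c b) c
      else pvAt (pvSwapA (pvSwapA (pvSwapA l a d) c d) c b) k :=
    fun k hk => pvAt_pvSwapA _ k hc0 (by omega) hd0 (by omega) hcd hk
  apply pvEq_of_at _ _ (by simp [pvSwapA_length])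
  intro k hk0 hkn
  rw [pvAt_pvSwapA _ k ha0 (by omega) hd0 (by omega) had hk0,
    pvAt_pvSwapA l k ha0 ha hb0 hb hab hk0,
    A4 d hd0, A4 a ha0, A4 k hk0,
    A3 c hc0, A3 d hd0, A3 a ha0, A3 k hk0,
    A2 b hb0, A2 c hc0, A2 d hd0, A2 a ha0, A2 k hk0,
    A1 b hb0, A1 c hc0, A1 d hd0, A1 a ha0, A1 k hk0]
  split_ifs <;> first | rfl | omega | (congr 1; omega)

lemma pvOk_false (X : Int) (A : List Int) (k : Int)
    (hk0 : 0 ≤ k) (_hk1 : k < (A.length : Int)) (hkX : k < X) (hkn : (A.length : Int) ≤ k + X)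
    (hne : pvAt A k ≠ pvAt (pvSortA A) k) :
    ∀ (m : Nat) (fuel : Int), fuel.toNat ≤ m → ∀ A' : List Int, A'.Perm A → pvAt A' k = pvAt A k →
      pvOk (pvPairs X (A.length : Int)) A' fuel = false := by
  intro m
  induction m with
  | zero =>
    intro fuel hf A' hperm hAk
    have hS : pvSortA A' = pvSortA A := pvSort_congr hperm
    have hs : ¬ (A' = pvSortA A') := by
      intro h
      apply hne
      calc pvAt A k = pvAt A' k := hAk.symm
        _ = pvAt (pvSortA A) k := by conv_lhs => rw [h, hS]
    rw [pvOk, if_neg hs, if_pos (by omega : fuel ≤ 0)]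
  | succ m ih =>
    intro fuel hf A' hperm hAk
    have hS : pvSortA A' = pvSortA A := pvSort_congr hperm
    have hlenA : A'.length = A.length := hperm.length_eq
    have hs : ¬ (A' = pvSortA A') := by
      intro h
      apply hne
      calc pvAt A k = pvAt A' k := hAk.symm
        _ = pvAt (pvSortA A) k := by conv_lhs => rw [h, hS]
    rw [pvOk, if_neg hs]
    by_cases hf0 : fuel ≤ 0
    · rw [if_pos hf0]
    · rw [if_neg hf0]
      apply List.any_eq_false.mpr
      intro p hp
      obtain ⟨h1, h2, h3, h4⟩ := (pvPairs_mem X (A.length : Int) p).mp hp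
      have hki : k ≠ p.1 := by omega
      have hkj : k ≠ p.2 := by omega
      have hb1 : p.1 < (A'.length : Int) := by omega
      have hb2 : p.2 < (A'.length : Int) := by omega
      simp only [Bool.not_eq_true]
      apply ih (fuel - 1) (by omega) _ ((pvSwapA_perm A' (by omega) hb1 (by omega) hb2).trans hperm)
      rw [pvAt_pvSwapA A' k (by omega) hb1 (by omega) hb2 (by omega) hk0,
        if_neg hki, if_neg hkj, hAk]

lemma pvOk_of_seq (X n : Int) :
    ∀ (seq : List (Int × Int)) (A' : List Int) (fuel : Int),
      (A'.length : Int) = n →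
      (∀ p ∈ seq, p ∈ pvPairs X n) →
      pvApp A' seq = pvSortA A' →
      (seq.length : Int) ≤ fuel →
      pvOk (pvPairs X n) A' fuel = true := by
  intro seq
  induction seq with
  | nil =>
    intro A' fuel hlen hmem happ hfuel
    rw [pvOk, if_pos (show A' = pvSortA A' from happ)]
  | cons p rest ih =>
    intro A' fuel hlen hmem happ hfuel
    rw [pvOk]
    by_cases hs : A' = pvSortA A'
    · rw [if_pos hs]
    · rw [if_neg hs, if_neg (by simp only [List.length_cons] at hfuel; push_cast at hfuel; omega : ¬ fuel ≤ 0)]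
      rw [List.any_eq_true]
      refine ⟨p, hmem p (by simp), ?_⟩
      obtain ⟨h1, h2, h3, h4⟩ := (pvPairs_mem X n p).mp (hmem p (by simp))
      have hb1 : p.1 < (A'.length : Int) := by omega
      have hb2 : p.2 < (A'.length : Int) := by omega
      have hpm : (pvSwapA A' p.1 p.2).Perm A' := pvSwapA_perm A' (by omega) hb1 (by omega) hb2
      apply ih (pvSwapA A' p.1 p.2) (fuel - 1)
      · rw [pvSwapA_length]; exact hlen
      · intro q hq; exact hmem q (by simp [hq])
      · rw [pvSort_congr hpm, ← happ]; rfl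
      · simp only [List.length_cons] at hfuel; push_cast at hfuel ⊢; omega

lemma pvStep (X : Int) (A' : List Int) {i j : Int}
    (hi0 : 0 ≤ i) (hij : i < j) (hj : j < (A'.length : Int))
    (hMi : X ≤ i ∨ i + X < (A'.length : Int)) (hMj : X ≤ j ∨ j + X < (A'.length : Int)) :
    ∃ σ : List (Int × Int),
      (∀ p ∈ σ, p ∈ pvPairs X (A'.length : Int)) ∧
      σ.length ≤ pvStepB (A'.length : Int) ∧
      pvApp A' σ = pvSwapA A' i j := by
  have hsb1 : 1 ≤ pvStepB (A'.length : Int) := by unfold pvStepB; split_ifs <;> omega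
  by_cases hdir : X ≤ j - i
  · refine ⟨[(i, j)], ?_, by simpa using hsb1, rfl⟩
    intro p hp
    simp only [List.mem_singleton] at hp
    subst hp
    rw [pvPairs_mem]
    exact ⟨hi0, hij, hj, hdir⟩
  · have hX2 : 2 ≤ X := by omega
    rcases hMj with hXj | hjn
    · rcases hMi with hXi | hin
      · -- both at least X away from position 0: route through the hub 0
        have hn4 : 4 ≤ (A'.length : Int) := by omega
        have hsb3 : 3 ≤ pvStepB (A'.length : Int) := by unfold pvStepB; split_ifs <;> omega
        refine ⟨[(0, i), (0, j), (0, i)], ?_, by simpa using hsb3, ?_⟩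
        · intro p hp
          have hp' : p = (0, i) ∨ p = (0, j) ∨ p = (0, i) := by simpa using hp
          rcases hp' with rfl | rfl | rfl <;> (rw [pvPairs_mem]; dsimp only; omega)
        · show pvSwapA (pvSwapA (pvSwapA A' 0 i) 0 j) 0 i = pvSwapA A' i j
          rw [pvSwapA_comm A' (by omega) (by omega) hi0 (by omega) (by omega)]
          rw [pvSwapA_comm (pvSwapA A' i 0) (by omega) (by rw [pvSwapA_length]; omega) (by omega)
            (by rw [pvSwapA_length]; omega) (by omega)]
          rw [pvSwapA_comm (pvSwapA (pvSwapA A' i 0) j 0) (by omega)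
            (by rw [pvSwapA_length, pvSwapA_length]; omega) hi0
            (by rw [pvSwapA_length, pvSwapA_length]; omega) (by omega)]
          exact pvHub3 A' hi0 (by omega) (by omega) hj (by omega) (by omega)
            (by omega) (by omega) (by omega)
      · -- i within X of 0, j within X of 0 on the value side: the two-hub route 0 / n-1
        have hi1 : 1 ≤ i := by omega
        have hj2 : j < (A'.length : Int) - 1 := by omega
        have hn4 : 4 ≤ (A'.length : Int) := by omega
        have hsb5 : pvStepB (A'.length : Int) = 5 := by unfold pvStepB; split_ifs <;> omega
        refine ⟨[(i, (A'.length : Int) - 1), (0, (A'.length : Int) - 1), (0, j),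
            (0, (A'.length : Int) - 1), (i, (A'.length : Int) - 1)], ?_, by simp [hsb5], ?_⟩
        · intro p hp
          have hp' : p = (i, (A'.length : Int) - 1) ∨ p = (0, (A'.length : Int) - 1) ∨
              p = (0, j) ∨ p = (0, (A'.length : Int) - 1) ∨
              p = (i, (A'.length : Int) - 1) := by simpa using hp
          rcases hp' with rfl | rfl | rfl | rfl | rfl <;> (rw [pvPairs_mem]; dsimp only; omega)
        · show pvSwapA (pvSwapA (pvSwapA (pvSwapA (pvSwapA A' i ((A'.length : Int) - 1)) 0
              ((A'.length : Int) - 1)) 0 j) 0 ((A'.length : Int) - 1)) i ((A'.length : Int) - 1)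
            = pvSwapA A' i j
          exact pvHub5 A' hi0 (by omega) (by omega) hj (by omega) (by omega) (by omega) (by omega)
            (by omega) (by omega) (by omega) (by omega) (by omega) (by omega)
    · -- j at least X away from position n-1: route through the hub n-1
      have hn3 : 3 ≤ (A'.length : Int) := by omega
      have hsb3 : 3 ≤ pvStepB (A'.length : Int) := by unfold pvStepB; split_ifs <;> omega
      refine ⟨[(i, (A'.length : Int) - 1), (j, (A'.length : Int) - 1),
          (i, (A'.length : Int) - 1)], ?_, by simpa using hsb3, ?_⟩
      · intro p hp
        have hp' : p = (i, (A'.length : Int) - 1) ∨ p = (j, (A'.length : Int) - 1) ∨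
            p = (i, (A'.length : Int) - 1) := by simpa using hp
        rcases hp' with rfl | rfl | rfl <;> (rw [pvPairs_mem]; dsimp only; omega)
      · show pvSwapA (pvSwapA (pvSwapA A' i ((A'.length : Int) - 1)) j ((A'.length : Int) - 1))
            i ((A'.length : Int) - 1) = pvSwapA A' i j
        exact pvHub3 A' hi0 (by omega) (by omega) hj (by omega) (by omega)
          (by omega) (by omega) (by omega)

lemma pvFindJ (X : Int) (A' S' : List Int) (i : Int)
    (hlen : A'.length = S'.length) (hperm : A'.Perm S')
    (hi0 : 0 ≤ i) (hi : i < (S'.length : Int))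
    (hpre : ∀ k : Int, 0 ≤ k → k < i → pvAt A' k = pvAt S' k)
    (hfro : ∀ k : Int, 0 ≤ k → k < (S'.length : Int) → k < X → (S'.length : Int) ≤ k + X →
      pvAt A' k = pvAt S' k)
    (hmis : pvAt A' i ≠ pvAt S' i) :
    ∃ j : Int, i < j ∧ j < (S'.length : Int) ∧ (X ≤ j ∨ j + X < (S'.length : Int)) ∧
      pvAt A' j = pvAt S' i := by
  have hMovi : X ≤ i ∨ i + X < (S'.length : Int) := by
    by_contra h
    push_neg at h
    exact hmis (hfro i hi0 hi (by omega) (by omega))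
  set n : Int := (S'.length : Int) with hn
  set P : Int → Bool := fun k => decide (i ≤ k) && (decide (X ≤ k) || decide (k + X < n)) with hP
  set R : List Int := PySem.List.pyRange 0 n 1 with hR
  have hA : R.map (fun k => pvAt A' k) = A' := by
    simp only [pvAt, hR, hn, ← hlen]
    exact PySem.List.map_pyGetD_pyRange_zero' A' 0
  have hS : R.map (fun k => pvAt S' k) = S' := by
    simp only [pvAt, hR, hn]
    exact PySem.List.map_pyGetD_pyRange_zero' S' 0
  have e1 : ((R.filter P).map (fun k => pvAt A' k) ++
      (R.filter (fun x => !P x)).map (fun k => pvAt A' k)).Perm A' := by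
    rw [← List.map_append]
    conv_rhs => rw [← hA]
    exact (List.filter_append_perm P R).map _
  have e2 : ((R.filter P).map (fun k => pvAt S' k) ++
      (R.filter (fun x => !P x)).map (fun k => pvAt S' k)).Perm S' := by
    rw [← List.map_append]
    conv_rhs => rw [← hS]
    exact (List.filter_append_perm P R).map _
  have e3 : (R.filter (fun x => !P x)).map (fun k => pvAt A' k) =
      (R.filter (fun x => !P x)).map (fun k => pvAt S' k) := by
    apply List.map_congr_left
    intro k hk
    rw [List.mem_filter] at hk
    obtain ⟨hkR, hkP⟩ := hk
    rw [hR, PySem.List.mem_pyRange_one] at hkR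
    have hkP' : ¬ (i ≤ k ∧ (X ≤ k ∨ k + X < n)) := by
      rintro ⟨h1, h2⟩
      have hPk : P k = true := by
        rw [hP]
        simp only [Bool.and_eq_true, Bool.or_eq_true, decide_eq_true_eq]
        exact ⟨h1, h2⟩
      rw [hPk] at hkP
      exact absurd hkP (by simp)
    by_cases hik : k < i
    · exact hpre k hkR.1 hik
    · have hnb : ¬ (X ≤ k ∨ k + X < n) := fun hb => hkP' ⟨by omega, hb⟩
      obtain ⟨hx1, hx2⟩ := not_or.mp hnb
      exact hfro k hkR.1 hkR.2 (by omega) (by omega)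
  have e4 : ((R.filter P).map (fun k => pvAt A' k)).Perm
      ((R.filter P).map (fun k => pvAt S' k)) := by
    have := e1.trans (hperm.trans e2.symm)
    rw [e3] at this
    exact (List.perm_append_right_iff _).mp this
  have hv : pvAt S' i ∈ (R.filter P).map (fun k => pvAt S' k) := by
    apply List.mem_map.mpr
    refine ⟨i, List.mem_filter.mpr ⟨?_, ?_⟩, rfl⟩
    · rw [hR]; exact PySem.List.mem_pyRange_one.mpr ⟨hi0, hi⟩
    · simp only [hP, Bool.and_eq_true, Bool.or_eq_true, decide_eq_true_eq]
      exact ⟨le_refl i, by omega⟩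
  have hv' : pvAt S' i ∈ (R.filter P).map (fun k => pvAt A' k) := e4.symm.subset hv
  obtain ⟨j, hjmem, hjv⟩ := List.mem_map.mp hv'
  have hjf := List.mem_filter.mp hjmem
  have hjR : 0 ≤ j ∧ j < n := by
    have := hjf.1; rw [hR] at this; exact PySem.List.mem_pyRange_one.mp this
  have hjP : i ≤ j ∧ (X ≤ j ∨ j + X < n) := by
    have := hjf.2
    simp only [hP, Bool.and_eq_true, Bool.or_eq_true, decide_eq_true_eq] at this
    exact this
  have hij : i ≠ j := by
    intro h
    subst h
    exact hmis hjv
  exact ⟨j, by omega, hjR.2, hjP.2, hjv⟩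

lemma pvSortSeq (X : Int) (A : List Int) :
    ∀ (t : Nat) (A' : List Int), A'.length = A.length → A'.Perm (pvSortA A) →
      (∀ k : Int, 0 ≤ k → k < (A.length : Int) → k < X → (A.length : Int) ≤ k + X →
        pvAt A' k = pvAt (pvSortA A) k) →
      (∀ k : Int, 0 ≤ k → k < (A.length : Int) - t → pvAt A' k = pvAt (pvSortA A) k) →
      ∃ seq, (∀ p ∈ seq, p ∈ pvPairs X (A.length : Int)) ∧
        pvApp A' seq = pvSortA A ∧ seq.length ≤ (t - 1) * pvStepB (A.length : Int) := by
  have hSlen : ((pvSortA A).length : Int) = (A.length : Int) := by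
    simp [pvSortA, PySem.List.length_sorted]
  intro t
  induction t with
  | zero =>
    intro A' hlen hperm hfro hpre
    refine ⟨[], fun p hp => by simp at hp, ?_, by simp⟩
    show A' = pvSortA A
    apply pvEq_of_at _ _ (by omega)
    intro k hk0 hkn
    exact hpre k hk0 (by push_cast; omega)
  | succ t ih =>
    intro A' hlen hperm hfro hpre
    by_cases hi0 : 0 ≤ (A.length : Int) - t - 1
    · by_cases hmis : pvAt A' ((A.length : Int) - t - 1) = pvAt (pvSortA A) ((A.length : Int) - t - 1)
      · obtain ⟨seq, h1, h2, h3⟩ := ih A' hlen hperm hfro (fun k hk0 hk => by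
          by_cases hki : k = (A.length : Int) - t - 1
          · rw [hki]; exact hmis
          · exact hpre k hk0 (by push_cast; omega))
        exact ⟨seq, h1, h2, le_trans h3 (Nat.mul_le_mul_right _ (by omega))⟩
      · have hin : (A.length : Int) - t - 1 < (A.length : Int) := by omega
        have hlen2 : A'.length = (pvSortA A).length := by omega
        obtain ⟨j, hij, hjn, hMj, hjv⟩ := pvFindJ X A' (pvSortA A) ((A.length : Int) - t - 1)
          hlen2 hperm hi0 (by omega)
          (fun k hk0 hk => hpre k hk0 (by push_cast; omega))
          (fun k hk0 h1 h2 h3 => hfro k hk0 (by omega) h2 (by omega))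
          hmis
        have hMovi : X ≤ (A.length : Int) - t - 1 ∨ ((A.length : Int) - t - 1) + X < (A.length : Int) := by
          by_contra h
          push_neg at h
          exact hmis (hfro _ hi0 hin (by omega) (by omega))
        have ht1 : 1 ≤ t := by omega
        obtain ⟨σ, hσmem, hσlen, hσapp⟩ := pvStep X A' (i := (A.length : Int) - t - 1) (j := j)
          hi0 hij (by omega) (by omega) (by omega)
        rw [hlen] at hσmem hσlen
        have hb1 : (A.length : Int) - t - 1 < (A'.length : Int) := by omega
        have hb2 : j < (A'.length : Int) := by omega
        have hperm' : (pvSwapA A' ((A.length : Int) - t - 1) j).Perm (pvSortA A) :=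
          (pvSwapA_perm A' hi0 hb1 (by omega) hb2).trans hperm
        have hAt : ∀ k : Int, 0 ≤ k → pvAt (pvSwapA A' ((A.length : Int) - t - 1) j) k =
            if k = (A.length : Int) - t - 1 then pvAt A' j
            else if k = j then pvAt A' ((A.length : Int) - t - 1) else pvAt A' k :=
          fun k hk => pvAt_pvSwapA A' k hi0 hb1 (by omega) hb2 (by omega) hk
        obtain ⟨seq', hs1, hs2, hs3⟩ := ih (pvSwapA A' ((A.length : Int) - t - 1) j)
          (by rw [pvSwapA_length]; exact hlen) hperm'
          (fun k hk0 hk1 hk2 hk3 => by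
            rw [hAt k hk0, if_neg (by omega), if_neg (by omega)]
            exact hfro k hk0 hk1 hk2 hk3)
          (fun k hk0 hk => by
            rw [hAt k hk0]
            by_cases hki : k = (A.length : Int) - t - 1
            · rw [if_pos hki, hki]; exact hjv
            · rw [if_neg hki, if_neg (by omega)]
              exact hpre k hk0 (by push_cast at hk ⊢; omega))
        refine ⟨σ ++ seq', ?_, ?_, ?_⟩
        · intro p hp
          rcases List.mem_append.mp hp with h | h
          · exact hσmem p h
          · exact hs1 p h
        · rw [pvApp, List.foldl_append, ← pvApp, ← pvApp, hσapp]
          exact hs2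
        · rw [List.length_append]
          have hc : pvStepB (A.length : Int) + (t - 1) * pvStepB (A.length : Int) =
              t * pvStepB (A.length : Int) := by
            cases t with
            | zero => omega
            | succ u => rw [Nat.add_sub_cancel, Nat.succ_mul]; omega
          simp only [Nat.add_sub_cancel]
          have := Nat.add_le_add hσlen hs3
          omega
    · obtain ⟨seq, h1, h2, h3⟩ := ih A' hlen hperm hfro
        (fun k hk0 hk => absurd hk (by omega))
      exact ⟨seq, h1, h2, le_trans h3 (Nat.mul_le_mul_right _ (by omega))⟩

lemma pvBound (m : Nat) : (((m - 1) * pvStepB (m : Int) : Nat) : Int) ≤ (m : Int) * (m : Int) := by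
  have : (m - 1) * pvStepB (m : Int) ≤ m * m := by
    unfold pvStepB
    split_ifs with h1 h2
    · have : m ≤ 2 := by exact_mod_cast h1
      interval_cases m <;> decide
    · have : m = 3 := by omega
      subst this; decide
    · have h4 : 4 ≤ m := by omega
      rcases Nat.lt_or_ge m 5 with h5 | h5
      · have : m = 4 := by omega
        subst this; decide
      · have := Nat.mul_le_mul h5 (le_refl m)
        omega
  push_cast at this ⊢
  omega

lemma pvOk_iff (X : Int) (A : List Int) :
    pvOk (pvPairs X (A.length : Int)) A ((A.length : Int) * (A.length : Int)) = true ↔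
      (∀ k : Int, 0 ≤ k → k < (A.length : Int) → k < X → (A.length : Int) ≤ k + X →
        pvAt A k = pvAt (pvSortA A) k) := by
  constructor
  · intro hok k hk0 hk1 hkX hkn
    by_contra hne
    have hfalse := pvOk_false X A k hk0 hk1 hkX hkn hne
      (((A.length : Int) * (A.length : Int)).toNat) ((A.length : Int) * (A.length : Int))
      (le_refl _) A (List.Perm.refl A) rfl
    rw [hok] at hfalse
    exact absurd hfalse (by simp)
  · intro hfro
    obtain ⟨seq, hmem, happ, hlen⟩ := pvSortSeq X A A.length A rfl
      (PySem.List.sorted_perm A (fun x => x) false).symm hfro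
      (fun k hk0 hk => absurd hk (by omega))
    apply pvOk_of_seq X (A.length : Int) seq A _ rfl hmem happ
    calc (seq.length : Int) ≤ (((A.length - 1) * pvStepB (A.length : Int) : Nat) : Int) := by
          exact_mod_cast hlen
      _ ≤ _ := pvBound A.length

-- ===== VERDICT (by name: the statement is the Claim_ definition above) =====
theorem ans_slow_spec : Claim_equal_ans_slow := by
  intro X A _
  unfold Spec_ans_slow ans_slow ans_slow_alt
  simp only []
  have hiff := pvOk_iff X A
  by_cases h : (∀ k : Int, 0 ≤ k → k < (A.length : Int) → k < X → (A.length : Int) ≤ k + X →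
      pvAt A k = pvAt (pvSortA A) k)
  · rw [if_pos (hiff.mpr h), if_neg ?_]
    rw [List.any_eq_true]
    rintro ⟨k, hkmem, hkp⟩
    rw [PySem.List.mem_pyRange_one] at hkmem
    simp only [Bool.not_eq_eq_eq_not, Bool.not_true, beq_eq_false_iff_ne, ne_eq] at hkp
    exact hkp (h k (by omega) (by omega) (by omega) (by omega))
  · rw [if_neg (fun hok => h (hiff.mp hok)), if_pos ?_]
    push_neg at h
    obtain ⟨k, hk0, hk1, hkX, hkn, hne⟩ := h
    rw [List.any_eq_true]
    refine ⟨k, PySem.List.mem_pyRange_one.mpr (by omega), by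
      simpa using hne⟩
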